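-- pv_equiv track=rewrite | github.com/kthieve/tlm | src/tlm/memory.py | prune_ready_to_budget
-- ===== SOURCE A (Python) =====
-- ITEM_MAX_LEN = 240
--
-- def prune_ready_to_budget(items: list[str], budget_chars: int) -> list[str]:
--     """Drop from the end until total chars fit (join with newlines heuristic)."""
--     if budget_chars <= 0:
--         return []
--     out: list[str] = []
--     total = 0
--     for s in items:
--         line = s[:ITEM_MAX_LEN]
--         add = len(line) + (1 if out else 0)
--         if total + add > budget_chars:
--             break
--         out.append(line)
--         total += add
--     return out
-- ===== SOURCE B (Python) =====
-- ITEM_MAX_LEN = 240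
--
-- def prune_ready_to_budget(items: list[str], budget_chars: int) -> list[str]:
--     """Table-based: build cumulative-cost prefix sums once, count how many fit, slice."""
--     if budget_chars <= 0:
--         return []
--     lines = [s[:ITEM_MAX_LEN] for s in items]
--     cum = []
--     t = 0
--     for line in lines:
--         t += len(line) + (1 if cum else 0)
--         cum.append(t)
--     k = sum(1 for c in cum if c <= budget_chars)
--     return lines[:k]
-- ===== Notes on version B (the rewrite author's own statement) =====
-- stated objective: alternative
-- what changed: Replaces A's fused accumulate-and-break loop by a three-stage pipeline: map items to truncated lines, build a cumulative-cost table (prefix sums), count how many prefix sums fit the budget, and slice that prefix.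
import Mathlib
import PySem

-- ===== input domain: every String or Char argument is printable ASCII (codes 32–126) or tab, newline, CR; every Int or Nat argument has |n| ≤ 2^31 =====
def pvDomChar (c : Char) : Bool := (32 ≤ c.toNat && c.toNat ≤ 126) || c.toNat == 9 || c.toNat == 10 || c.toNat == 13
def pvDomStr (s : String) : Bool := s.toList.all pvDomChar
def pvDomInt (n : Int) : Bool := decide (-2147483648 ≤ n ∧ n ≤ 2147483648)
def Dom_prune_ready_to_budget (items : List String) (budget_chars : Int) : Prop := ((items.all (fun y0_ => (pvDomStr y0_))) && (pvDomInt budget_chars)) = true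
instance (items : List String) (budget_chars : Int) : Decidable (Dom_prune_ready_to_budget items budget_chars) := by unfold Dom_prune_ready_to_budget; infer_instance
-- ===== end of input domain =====

-- B replaces A's fused accumulate-and-break loop by map + prefix-sum table + count + slice (alternative decomposition, same cost).

-- ===== PORT A =====
-- s[:240]
def pvTrunc (s : String) : String := PySem.Str.slice s none (some 240)

-- A's for-loop with break, state (out, total)
def pruneLoopA (b : Int) : List String → List String → Int → List String
  | [], out, _ => out
  | s :: rest, out, total =>
    let line := pvTrunc s
    let add : Int := PySem.Str.len line + (if out.isEmpty then 0 else 1)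
    if total + add > b then out
    else pruneLoopA b rest (out ++ [line]) (total + add)

def prune_ready_to_budget (items : List String) (budget_chars : Int) : List String :=
  if budget_chars ≤ 0 then []
  else pruneLoopA budget_chars items [] 0

-- ===== PORT B =====
def prune_ready_to_budget_alt (items : List String) (budget_chars : Int) : List String :=
  if budget_chars ≤ 0 then []
  else
    let lines := items.map pvTrunc
    let cum := (lines.foldl (fun (st : Int × List Int) line =>
        let t := st.1 + PySem.Str.len line + (if st.2.isEmpty then 0 else 1)
        (t, st.2 ++ [t])) ((0 : Int), ([] : List Int))).2
    let k := cum.countP (fun c => decide (c ≤ budget_chars))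
    lines.take k

-- ===== PRECONDITION & SPEC =====
def Spec_prune_ready_to_budget (items : List String) (budget_chars : Int) (out : List String) : Prop := out = prune_ready_to_budget_alt items budget_chars
instance (items : List String) (budget_chars : Int) (out : List String) : Decidable (Spec_prune_ready_to_budget items budget_chars out) := by unfold Spec_prune_ready_to_budget; infer_instance

-- ===== CLAIM (what is proved, stated in full; the proofs are below) =====
def Claim_equal_prune_ready_to_budget : Prop := ∀ (items : List String) (budget_chars : Int), Dom_prune_ready_to_budget items budget_chars → Spec_prune_ready_to_budget items budget_chars (prune_ready_to_budget items budget_chars)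

-- ===== LEMMAS AND PROOFS =====

-- break index of A's loop, over the already-truncated lines
def pvK (b : Int) : Int → Bool → List String → Nat
  | _, _, [] => 0
  | t, first, line :: rest =>
    let add : Int := PySem.Str.len line + (if first then 0 else 1)
    if t + add > b then 0 else pvK b (t + add) false rest + 1

-- the prefix-sum table B builds
def pvCums : Int → Bool → List String → List Int
  | _, _, [] => []
  | t, first, line :: rest =>
    let t' := t + (PySem.Str.len line + (if first then 0 else 1))
    t' :: pvCums t' false rest

theorem pv_len_nonneg (s : String) : 0 ≤ PySem.Str.len s := by
  simp

theorem pruneLoopA_eq (b : Int) : ∀ (items : List String) (acc : List String) (t : Int),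
    pruneLoopA b items acc t
      = acc ++ (items.map pvTrunc).take (pvK b t acc.isEmpty (items.map pvTrunc)) := by
  intro items
  induction items with
  | nil => intro acc t; simp [pruneLoopA, pvK]
  | cons s rest ih =>
    intro acc t
    simp only [pruneLoopA, pvK, List.map_cons]
    split_ifs with h <;>
      first
        | simp only [List.take_zero, List.append_nil]
        | (rw [ih (acc ++ [pvTrunc s]), show (acc ++ [pvTrunc s]).isEmpty = false by simp,
              List.take_succ_cons]
           simp only [List.append_assoc, List.singleton_append])

theorem foldB_eq : ∀ (lines : List String) (t : Int) (acc : List Int),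
    (lines.foldl (fun (st : Int × List Int) line =>
        let t := st.1 + PySem.Str.len line + (if st.2.isEmpty then 0 else 1)
        (t, st.2 ++ [t])) (t, acc)).2
      = acc ++ pvCums t acc.isEmpty lines := by
  intro lines
  induction lines with
  | nil => intro t acc; simp [pvCums]
  | cons line rest ih =>
    intro t acc
    simp only [List.foldl_cons, pvCums]
    rw [ih]
    rw [show ∀ x : Int, (acc ++ [x]).isEmpty = false by intro x; simp]
    simp [add_assoc]

theorem mem_pvCums_ge : ∀ (lines : List String) (t : Int) (first : Bool) (c : Int),
    c ∈ pvCums t first lines → t ≤ c := by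
  intro lines
  induction lines with
  | nil => intro t first c h; simp [pvCums] at h
  | cons line rest ih =>
    intro t first c h
    simp only [pvCums, List.mem_cons] at h
    have hadd : t ≤ t + PySem.Str.len line + (if first then 0 else 1) := by
      have := pv_len_nonneg line
      split_ifs <;> omega
    rcases h with h | h
    · omega
    · have := ih _ false c h; omega

theorem countP_pvCums (b : Int) : ∀ (lines : List String) (t : Int) (first : Bool),
    (pvCums t first lines).countP (fun c => decide (c ≤ b)) = pvK b t first lines := by
  intro lines
  induction lines with
  | nil => intro t first; simp [pvCums, pvK]
  | cons line rest ih =>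
    intro t first
    have key : ∀ (t' : Int), (t' :: pvCums t' false rest).countP (fun c => decide (c ≤ b))
        = if t' > b then 0 else pvK b t' false rest + 1 := by
      intro t'
      rw [List.countP_cons]
      by_cases h : t' > b
      · have h0 : (pvCums t' false rest).countP (fun c => decide (c ≤ b)) = 0 := by
          rw [List.countP_eq_zero]
          intro c hc
          have := mem_pvCums_ge rest t' false c hc
          simp only [decide_eq_true_eq]
          omega
        rw [if_pos h, h0, if_neg (by simp only [decide_eq_true_eq]; omega)]
      · rw [if_neg h, ih t' false, if_pos (by simp only [decide_eq_true_eq]; omega)]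
    cases first
    · simpa [pvCums, pvK] using key (t + (PySem.Str.len line + 1))
    · simpa [pvCums, pvK] using key (t + (PySem.Str.len line + 0))

-- ===== VERDICT (by name: the statement is the Claim_ definition above) =====
theorem prune_ready_to_budget_spec : Claim_equal_prune_ready_to_budget := by
  intro items budget_chars _
  unfold Spec_prune_ready_to_budget prune_ready_to_budget prune_ready_to_budget_alt
  by_cases hb : budget_chars ≤ 0
  · simp [hb]
  · simp only [hb, if_false]
    rw [pruneLoopA_eq, foldB_eq]
    simp only [List.nil_append, List.isEmpty_nil]
    rw [countP_pvCums]
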